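-- pv_equiv track=rewrite | github.com/zcarc/problem-solving | Programmers/level2/피로도_오답_1.py | solution
-- ===== SOURCE A (Python) =====
-- def solution(k, dungeons):
--     dungeons.sort()
--
--     cnt = 0
--     for i in range(len(dungeons)):
--         if k >= dungeons[i][0]:
--             k -= dungeons[i][0]
--             cnt += 1
--
--     return cnt
-- ===== SOURCE B (Python) =====
-- def solution(k, dungeons):
--     dungeons.sort()
--     prefix = []
--     s = 0
--     for d in dungeons:
--         s += d[0]
--         prefix.append(s)
--     cnt = 0
--     for s in prefix:
--         if s > k:
--             break
--         cnt += 1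
--     return cnt
-- ===== Notes on version B (the rewrite author's own statement) =====
-- stated objective: alternative
-- what changed: A's single greedy pass that subtracts each affordable cost from a running budget is replaced by a two-phase decomposition: build the prefix sums of the sorted required-fatigue values, then count prefix sums up to the first one exceeding k.
-- outside the precondition, e.g. on solution(5, [[], [3, 1]]): A raises IndexError, B raises IndexError
import Mathlib
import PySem

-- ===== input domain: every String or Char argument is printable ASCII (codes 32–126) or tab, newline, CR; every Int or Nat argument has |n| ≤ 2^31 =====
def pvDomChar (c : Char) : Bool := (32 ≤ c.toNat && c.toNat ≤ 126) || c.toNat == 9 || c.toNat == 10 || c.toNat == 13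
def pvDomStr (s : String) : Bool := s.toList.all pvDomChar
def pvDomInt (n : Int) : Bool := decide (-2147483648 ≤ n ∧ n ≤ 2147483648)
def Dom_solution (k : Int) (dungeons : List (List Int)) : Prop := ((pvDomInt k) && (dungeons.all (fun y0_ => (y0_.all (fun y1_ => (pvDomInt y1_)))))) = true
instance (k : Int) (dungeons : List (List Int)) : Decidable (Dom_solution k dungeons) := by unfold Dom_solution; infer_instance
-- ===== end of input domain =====

-- B replaces A's single greedy subtract-and-count pass by a two-phase decomposition: build the
-- prefix sums of the sorted required-fatigue values, then count the prefix sums up to the first one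
-- exceeding k (objective: alternative decomposition; A sorts its argument in place, B does the same,
-- and the equivalence proved here is about the return value).

-- ===== PORT A =====
def solution (k : Int) (dungeons : List (List Int)) : Int :=
  let ds := PySem.List.sorted dungeons (fun x => x) false
  -- for i in range(len(ds)): if k >= ds[i][0]: k -= ds[i][0]; cnt += 1
  -- ds[i][0] via pyGetD: outer index is always in range, inner raises only on an empty
  -- inner list, excluded by Pre_solution.
  let st := (PySem.List.pyRange 0 (PySem.List.len ds) 1).foldl
    (fun (st : Int × Int) i =>
      let h := PySem.List.pyGetD (PySem.List.pyGetD ds i []) 0 0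
      if st.1 ≥ h then (st.1 - h, st.2 + 1) else st) (k, 0)
  st.2

-- ===== PORT B =====
-- second phase of Source B: 'for s in prefix: if s > k: break; cnt += 1'
def countWhileLe (k : Int) : List Int → Int
  | [] => 0
  | s :: t => if s > k then 0 else countWhileLe k t + 1

def solution_alt (k : Int) (dungeons : List (List Int)) : Int :=
  let ds := PySem.List.sorted dungeons (fun x => x) false
  -- first phase: prefix sums of d[0] (d[0] raises on an empty inner list, excluded by Pre_solution)
  let pr := (ds.foldl (fun (st : List Int × Int) d =>
      let s := st.2 + PySem.List.pyGetD d 0 0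
      (st.1 ++ [s], s)) ([], 0)).1
  countWhileLe k pr

-- ===== PRECONDITION & SPEC =====
-- Pre_ excludes inputs containing an empty inner list, on which both A and B raise IndexError at d[0].
def Pre_solution (k : Int) (dungeons : List (List Int)) : Prop := ∀ d ∈ dungeons, d ≠ []
instance (k : Int) (dungeons : List (List Int)) : Decidable (Pre_solution k dungeons) := by unfold Pre_solution; infer_instance
def pvWitness_solution : Int × List (List Int) := (5, [[3, 1], [1, 2], [4]])

def Spec_solution (k : Int) (dungeons : List (List Int)) (out : Int) : Prop := out = solution_alt k dungeons
instance (k : Int) (dungeons : List (List Int)) (out : Int) : Decidable (Spec_solution k dungeons out) := by unfold Spec_solution; infer_instance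

-- ===== CLAIM (what is proved, stated in full; the proofs are below) =====
def Claim_equal_solution : Prop := ∀ (k : Int) (dungeons : List (List Int)), Dom_solution k dungeons → Pre_solution k dungeons → Spec_solution k dungeons (solution k dungeons)

-- ===== LEMMAS AND PROOFS =====

-- running prefix sums starting from s (the value phase 1 of B builds)
def presumsFrom (s : Int) : List Int → List Int
  | [] => []
  | h :: t => (s + h) :: presumsFrom (s + h) t

lemma presumsFrom_shift (t : List Int) : ∀ s : Int, presumsFrom s t = (presumsFrom 0 t).map (s + ·) := by
  induction t with
  | nil => intro s; simp [presumsFrom]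
  | cons h t ih =>
      intro s
      simp only [presumsFrom, List.map_cons]
      rw [ih (s + h), ih (0 + h), List.map_map]
      refine congrArg₂ (· :: ·) (by omega) ?_
      congr 1
      funext x
      simp only [Function.comp]
      omega

lemma countWhileLe_map_add (k h : Int) (l : List Int) :
    countWhileLe k (l.map (h + ·)) = countWhileLe (k - h) l := by
  induction l with
  | nil => simp [countWhileLe]
  | cons s t ih =>
      simp only [List.map_cons, countWhileLe]
      by_cases hc : s > k - h
      · rw [if_pos (by omega : h + s > k), if_pos hc]
      · rw [if_neg (by omega : ¬ h + s > k), if_neg hc, ih]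

-- A's fold leaves the state unchanged once every remaining head exceeds the budget
lemma greedy_skip (c : Int × Int) (hs : List Int) (hall : ∀ x ∈ hs, c.1 < x) :
    hs.foldl (fun st h => if st.1 ≥ h then (st.1 - h, st.2 + 1) else st) c = c := by
  induction hs with
  | nil => rfl
  | cons h t ih =>
      have h1 : c.1 < h := hall h (by simp)
      simp only [List.foldl_cons, if_neg (by omega : ¬ c.1 ≥ h)]
      exact ih (fun x hx => hall x (by simp [hx]))

-- main invariant: on a nondecreasing list of heads, A's greedy count is B's prefix-sum count
lemma greedy_eq_count (hs : List Int) : ∀ (k c : Int), hs.Pairwise (· ≤ ·) →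
    (hs.foldl (fun st h => if st.1 ≥ h then (st.1 - h, st.2 + 1) else st) (k, c)).2
      = c + countWhileLe k (presumsFrom 0 hs) := by
  induction hs with
  | nil => intro k c _; simp [presumsFrom, countWhileLe]
  | cons h t ih =>
      intro k c hp
      rw [List.pairwise_cons] at hp
      by_cases hk : k ≥ h
      · simp only [List.foldl_cons, if_pos hk, presumsFrom, countWhileLe, zero_add,
          if_neg (by omega : ¬ h > k)]
        rw [ih (k - h) (c + 1) hp.2, presumsFrom_shift t h, countWhileLe_map_add k h]
        omega
      · simp only [List.foldl_cons, if_neg hk, presumsFrom, countWhileLe, zero_add,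
          if_pos (by omega : h > k)]
        rw [greedy_skip (k, c) t (fun x hx => by have := hp.1 x hx; omega)]
        omega

lemma prefix_build (ds : List (List Int)) : ∀ (acc : List Int) (s : Int),
    (ds.foldl (fun (st : List Int × Int) d =>
        (st.1 ++ [st.2 + PySem.List.pyGetD d 0 0], st.2 + PySem.List.pyGetD d 0 0)) (acc, s)).1
      = acc ++ presumsFrom s (ds.map (fun d => PySem.List.pyGetD d 0 0)) := by
  induction ds with
  | nil => intro acc s; simp [presumsFrom]
  | cons d t ih =>
      intro acc s
      simp only [List.foldl_cons, List.map_cons, presumsFrom]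
      rw [ih]
      simp

lemma sorted_lists_pairwise (xs : List (List Int)) :
    (PySem.List.sorted xs (fun x => x) false).Pairwise (fun a b => a ≤ b) := by
  have h := PySem.List.sorted_pairwise (xs := xs) (key := fun (x : List Int) => x) (κ := List Int)
  have e : (LinearOrder.toDecidableLT : DecidableLT (List Int)) = (fun a b => a.decidableLT b) :=
    Subsingleton.elim _ _
  rw [e] at h
  exact h

lemma head_mono (a b : List Int) (ha : a ≠ []) (hb : b ≠ []) (hab : a ≤ b) :
    PySem.List.pyGetD a 0 0 ≤ PySem.List.pyGetD b 0 0 := by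
  cases a with
  | nil => exact absurd rfl ha
  | cons x xs =>
    cases b with
    | nil => exact absurd rfl hb
    | cons y ys =>
      simp only [PySem.List.pyGetD_zero_cons]
      by_contra hlt
      have : (y :: ys : List Int) < (x :: xs) := List.Lex.rel (by omega)
      exact absurd this (by simpa [List.le_iff_lt_or_eq] using (not_lt.mpr hab))

-- ===== VERDICT (by name: the statement is the Claim_ definition above) =====
theorem solution_spec : Claim_equal_solution := by
  intro k dungeons _ hpre
  unfold Spec_solution solution solution_alt
  set ds := PySem.List.sorted dungeons (fun x => x) false with hds
  have hne : ∀ d ∈ ds, d ≠ [] := by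
    intro d hd
    exact hpre d ((PySem.List.mem_sorted dungeons (fun x => x) false d).1 (hds ▸ hd))
  -- A's range loop over indices is a fold over ds
  have h1 : (PySem.List.pyRange 0 (PySem.List.len ds) 1).foldl
      (fun (st : Int × Int) i =>
        let h := PySem.List.pyGetD (PySem.List.pyGetD ds i []) 0 0
        if st.1 ≥ h then (st.1 - h, st.2 + 1) else st) (k, 0)
      = ds.foldl (fun (st : Int × Int) d =>
          if st.1 ≥ PySem.List.pyGetD d 0 0 then (st.1 - PySem.List.pyGetD d 0 0, st.2 + 1) else st) (k, 0) :=
    PySem.List.foldl_pyRange_zero_pyGetD ds ([] : List Int)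
      (fun (st : Int × Int) d =>
        if st.1 ≥ PySem.List.pyGetD d 0 0 then (st.1 - PySem.List.pyGetD d 0 0, st.2 + 1) else st) (k, 0)
  -- heads of the sorted list, and their order
  have hpair : (ds.map (fun d => PySem.List.pyGetD d 0 0)).Pairwise (· ≤ ·) := by
    rw [List.pairwise_map]
    exact (sorted_lists_pairwise dungeons).imp_of_mem
      (fun {a b} ha hb hab => head_mono a b (hne a (hds ▸ ha)) (hne b (hds ▸ hb)) hab)
  have h2 : ds.foldl (fun (st : Int × Int) d =>
        if st.1 ≥ PySem.List.pyGetD d 0 0 then (st.1 - PySem.List.pyGetD d 0 0, st.2 + 1) else st) (k, 0)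
      = (ds.map (fun d => PySem.List.pyGetD d 0 0)).foldl
          (fun (st : Int × Int) h => if st.1 ≥ h then (st.1 - h, st.2 + 1) else st) (k, 0) := by
    rw [List.foldl_map]
  have h3 : (ds.foldl (fun (st : List Int × Int) d =>
        let s := st.2 + PySem.List.pyGetD d 0 0
        (st.1 ++ [s], s)) ([], 0)).1
      = presumsFrom 0 (ds.map (fun d => PySem.List.pyGetD d 0 0)) := by
    have := prefix_build ds ([] : List Int) 0
    simpa using this
  show ((PySem.List.pyRange 0 (PySem.List.len ds) 1).foldl
      (fun (st : Int × Int) i =>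
        let h := PySem.List.pyGetD (PySem.List.pyGetD ds i []) 0 0
        if st.1 ≥ h then (st.1 - h, st.2 + 1) else st) (k, 0)).2
    = countWhileLe k ((ds.foldl (fun (st : List Int × Int) d =>
        let s := st.2 + PySem.List.pyGetD d 0 0
        (st.1 ++ [s], s)) ([], 0)).1)
  rw [h1, h2, h3]
  simpa using greedy_eq_count (ds.map (fun d => PySem.List.pyGetD d 0 0)) k 0 hpair
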